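-- pv_equiv track=rewrite | github.com/NVIDIA/apex | apex/contrib/sparsity/permutation_search_kernels/channel_swap.py | stripes_and_swap_idx_to_columns
-- ===== SOURCE A (Python) =====
-- def stripes_and_swap_idx_to_columns(stripe0, stripe1, idx):
--     i = 0
--     for c0 in range(4):
--         for c1 in range(4):
--             if i == idx:
--                 return stripe0*4+c0, stripe1*4+c1
--             i += 1
--     return None
-- ===== SOURCE B (Python) =====
-- def stripes_and_swap_idx_to_columns(stripe0, stripe1, idx):
--     if 0 <= idx < 16:
--         return stripe0 * 4 + idx // 4, stripe1 * 4 + idx % 4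
--     return None
-- ===== Notes on version B (the rewrite author's own statement) =====
-- stated objective: simpler
-- what changed: Replaced the nested 4x4 counting loop with a range test and a direct closed form (idx//4, idx%4) for the two column offsets.
import Mathlib
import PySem

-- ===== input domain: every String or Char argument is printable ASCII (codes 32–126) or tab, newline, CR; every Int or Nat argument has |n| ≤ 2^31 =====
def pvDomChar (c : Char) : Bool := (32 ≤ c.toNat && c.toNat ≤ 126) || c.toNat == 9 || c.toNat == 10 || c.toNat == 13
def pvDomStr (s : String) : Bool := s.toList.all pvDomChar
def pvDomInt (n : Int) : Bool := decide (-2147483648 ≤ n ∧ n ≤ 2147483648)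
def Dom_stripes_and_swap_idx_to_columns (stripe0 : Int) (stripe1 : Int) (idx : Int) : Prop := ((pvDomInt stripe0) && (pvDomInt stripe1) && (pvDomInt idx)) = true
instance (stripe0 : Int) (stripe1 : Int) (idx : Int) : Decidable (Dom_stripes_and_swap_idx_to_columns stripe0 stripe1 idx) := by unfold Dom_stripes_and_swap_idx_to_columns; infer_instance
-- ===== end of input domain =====

-- B replaces A's nested 4×4 counting loop by a range check and the closed form (idx//4, idx%4); objective: simpler.

-- ===== PORT A =====
-- A's nested for-loops with an early return: the fold state is (i, result);
-- once the result is `some`, the remaining iterations do nothing (models `return`).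
def pvABody (stripe0 stripe1 idx c0 : Int) (st : Int × Option (Int × Int)) (c1 : Int) :
    Int × Option (Int × Int) :=
  match st with
  | (i, none) =>
      if i == idx then (i, some (stripe0 * 4 + c0, stripe1 * 4 + c1))
      else (i + 1, none)
  | (i, some r) => (i, some r)

def pvAInner (stripe0 stripe1 idx : Int) (st : Int × Option (Int × Int)) (c0 : Int) :
    Int × Option (Int × Int) :=
  (PySem.List.pyRange 0 4 1).foldl (pvABody stripe0 stripe1 idx c0) st

def stripes_and_swap_idx_to_columns (stripe0 : Int) (stripe1 : Int) (idx : Int) : Option (Int × Int) :=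
  ((PySem.List.pyRange 0 4 1).foldl (pvAInner stripe0 stripe1 idx)
    ((0 : Int), (none : Option (Int × Int)))).2

-- ===== PORT B =====
def stripes_and_swap_idx_to_columns_alt (stripe0 : Int) (stripe1 : Int) (idx : Int) : Option (Int × Int) :=
  if 0 ≤ idx ∧ idx < 16 then
    some (stripe0 * 4 + PySem.Int.floordiv idx 4, stripe1 * 4 + PySem.Int.mod idx 4)
  else
    none

-- ===== PRECONDITION & SPEC =====
def Spec_stripes_and_swap_idx_to_columns (stripe0 : Int) (stripe1 : Int) (idx : Int) (out : Option (Int × Int)) : Prop := out = stripes_and_swap_idx_to_columns_alt stripe0 stripe1 idx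
instance (stripe0 : Int) (stripe1 : Int) (idx : Int) (out : Option (Int × Int)) : Decidable (Spec_stripes_and_swap_idx_to_columns stripe0 stripe1 idx out) := by unfold Spec_stripes_and_swap_idx_to_columns; infer_instance

-- ===== CLAIM (what is proved, stated in full; the proofs are below) =====
def Claim_equal_stripes_and_swap_idx_to_columns : Prop := ∀ (stripe0 : Int) (stripe1 : Int) (idx : Int), Dom_stripes_and_swap_idx_to_columns stripe0 stripe1 idx → Spec_stripes_and_swap_idx_to_columns stripe0 stripe1 idx (stripes_and_swap_idx_to_columns stripe0 stripe1 idx)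

-- ===== LEMMAS AND PROOFS =====
-- inner loop makes no match and just counts four steps when idx is outside [i, i+4)
theorem pvAInner_none (stripe0 stripe1 idx c0 i : Int) (h : ¬(i ≤ idx ∧ idx < i + 4)) :
    pvAInner stripe0 stripe1 idx (i, none) c0 = (i + 4, none) := by
  have h0 : i ≠ idx := by omega
  have h1 : i + 1 ≠ idx := by omega
  have h2 : i + 1 + 1 ≠ idx := by omega
  have h3 : i + 1 + 1 + 1 ≠ idx := by omega
  simp [pvAInner, pvABody, PySem.List.pyRange, List.range_succ, h0, h1, h2, h3]
  ring

-- ===== VERDICT (by name: the statement is the Claim_ definition above) =====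
theorem stripes_and_swap_idx_to_columns_spec : Claim_equal_stripes_and_swap_idx_to_columns := by
  intro stripe0 stripe1 idx _
  unfold Spec_stripes_and_swap_idx_to_columns
  by_cases h : 0 ≤ idx ∧ idx < 16
  · obtain ⟨h0, h1⟩ := h
    interval_cases idx <;>
      simp [stripes_and_swap_idx_to_columns, stripes_and_swap_idx_to_columns_alt, pvAInner, pvABody,
        PySem.List.pyRange, PySem.Int.floordiv, PySem.Int.mod, List.range_succ]
  · simp only [stripes_and_swap_idx_to_columns_alt, if_neg h]
    have hr : PySem.List.pyRange 0 4 1 = [0, 1, 2, 3] := by decide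
    simp only [stripes_and_swap_idx_to_columns, hr, List.foldl_cons, List.foldl_nil]
    rw [pvAInner_none _ _ _ _ _ (by omega)]
    rw [pvAInner_none _ _ _ _ _ (by omega)]
    rw [pvAInner_none _ _ _ _ _ (by omega)]
    rw [pvAInner_none _ _ _ _ _ (by omega)]
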